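-- pv_equiv track=rewrite | github.com/athenarc/experimental-analysis-of-value-linking | variations.py | _apply_selective_space_removal
-- ===== SOURCE A (Python) =====
-- def _apply_selective_space_removal(value_str: str) -> str:
--     if ' ' not in value_str:
--         return value_str
--
--     space_indices = [i for i, char in enumerate(value_str) if char == ' ']
--     num_spaces = len(space_indices)
--
--     if num_spaces == 0: # Should be caught by ' ' not in value_str check earlier
--         return value_str
--
--     if num_spaces == 1:
--         idx_to_remove = space_indices[0]
--         return value_str[:idx_to_remove] + value_str[idx_to_remove+1:]
--
--     # num_spaces > 1: keep the "middle" space character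
--     # The middle space is determined by its order of appearance.
--     middle_space_occurrence_index = (num_spaces - 1) // 2
--     char_idx_of_space_to_keep = space_indices[middle_space_occurrence_index]
--
--     new_str_chars = []
--     for i, char in enumerate(value_str):
--         if char == ' ':
--             if i == char_idx_of_space_to_keep:
--                 new_str_chars.append(' ') # Keep this specific space
--             # Else (it's a space but not the one to keep), do nothing (remove it)
--         else:
--             new_str_chars.append(char) # Keep non-space characters
--
--     return "".join(new_str_chars)
-- ===== SOURCE B (Python) =====
-- def _apply_selective_space_removal(value_str: str) -> str:
--     if ' ' not in value_str:
--         return value_str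
--
--     space_indices = [i for i, char in enumerate(value_str) if char == ' ']
--     n = len(space_indices)
--
--     if n == 1:
--         k = space_indices[0]
--         return value_str[:k] + value_str[k+1:]
--
--     # n >= 2: keep only the middle space; delete every space in each half with str.replace
--     keep = space_indices[(n - 1) // 2]
--     return value_str[:keep].replace(' ', '') + ' ' + value_str[keep+1:].replace(' ', '')
-- ===== Notes on version B (the rewrite author's own statement) =====
-- stated objective: simpler
-- what changed: The character-by-character accumulator loop that decides for each position whether it is the kept space is replaced by splitting the string at the pivot space and stripping all spaces from each half with str.replace, rejoining with one literal space.
import Mathlib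
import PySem

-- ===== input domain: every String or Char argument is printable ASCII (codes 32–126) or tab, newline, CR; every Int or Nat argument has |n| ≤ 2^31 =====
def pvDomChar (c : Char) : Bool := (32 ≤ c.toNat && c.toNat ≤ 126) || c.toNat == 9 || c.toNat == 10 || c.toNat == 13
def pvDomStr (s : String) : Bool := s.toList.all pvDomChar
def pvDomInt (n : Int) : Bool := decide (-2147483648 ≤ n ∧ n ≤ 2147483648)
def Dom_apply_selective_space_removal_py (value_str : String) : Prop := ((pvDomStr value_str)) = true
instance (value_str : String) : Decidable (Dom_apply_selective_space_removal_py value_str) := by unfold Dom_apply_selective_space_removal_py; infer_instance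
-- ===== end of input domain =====

-- B replaces A's character-by-character keep/drop loop by splitting at the pivot space and
-- deleting the spaces of each half with str.replace (objective: simpler).

-- ===== PORT A =====
-- loop body of A's `for i, char in enumerate(value_str)` accumulator loop
def pvStepA (keep : Int) (acc : List Char) (p : Int × Char) : List Char :=
  if p.2 = ' ' then (if p.1 = keep then acc ++ [' '] else acc) else acc ++ [p.2]

def apply_selective_space_removal_py (value_str : String) : String :=
  let cs := value_str.toList
  if ¬ (PySem.Chars.isIn [' '] cs = true) then value_str
  else
    let space_indices := ((PySem.List.enumerate cs 0).filter (fun p => p.2 == ' ')).map (fun p => p.1)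
    let num_spaces := space_indices.length
    if num_spaces = 0 then value_str
    else if num_spaces = 1 then
      let idx_to_remove := PySem.List.pyGetD space_indices 0 0
      String.ofList (PySem.List.slice cs none (some idx_to_remove) ++
                 PySem.List.slice cs (some (idx_to_remove + 1)) none)
    else
      let middle := PySem.Int.floordiv ((num_spaces : Int) - 1) 2
      let keep := PySem.List.pyGetD space_indices middle 0
      -- "".join of the accumulated char list
      String.ofList ((PySem.List.enumerate cs 0).foldl (pvStepA keep) [])

-- ===== PORT B =====
def apply_selective_space_removal_py_alt (value_str : String) : String :=
  let cs := value_str.toList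
  if ¬ (PySem.Chars.isIn [' '] cs = true) then value_str
  else
    let space_indices := ((PySem.List.enumerate cs 0).filter (fun p => p.2 == ' ')).map (fun p => p.1)
    let n := space_indices.length
    if n = 1 then
      let k := PySem.List.pyGetD space_indices 0 0
      String.ofList (PySem.List.slice cs none (some k) ++ PySem.List.slice cs (some (k + 1)) none)
    else
      let keep := PySem.List.pyGetD space_indices (PySem.Int.floordiv ((n : Int) - 1) 2) 0
      String.ofList (PySem.Chars.replace (PySem.List.slice cs none (some keep)) [' '] [] ++
                 [' '] ++
                 PySem.Chars.replace (PySem.List.slice cs (some (keep + 1)) none) [' '] [])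

-- ===== PRECONDITION & SPEC =====
def Spec_apply_selective_space_removal_py (value_str : String) (out : String) : Prop := out = apply_selective_space_removal_py_alt value_str
instance (value_str : String) (out : String) : Decidable (Spec_apply_selective_space_removal_py value_str out) := by unfold Spec_apply_selective_space_removal_py; infer_instance

-- ===== CLAIM (what is proved, stated in full; the proofs are below) =====
def Claim_equal_apply_selective_space_removal_py : Prop := ∀ (value_str : String), Dom_apply_selective_space_removal_py value_str → Spec_apply_selective_space_removal_py value_str (apply_selective_space_removal_py value_str)

-- ===== LEMMAS AND PROOFS =====

-- unfolding steps of str.replace's worker on old = " ", new = ""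
theorem replaceGo_space_cons (fuel : Nat) (t acc : List Char) :
    PySem.Chars.replace.go [' '] [] (fuel + 1) (' ' :: t) acc =
      PySem.Chars.replace.go [' '] [] fuel t acc := by
  simp [PySem.Chars.replace.go, List.isPrefixOf]

theorem replaceGo_char_cons (fuel : Nat) (c : Char) (t acc : List Char) (hc : c ≠ ' ') :
    PySem.Chars.replace.go [' '] [] (fuel + 1) (c :: t) acc =
      PySem.Chars.replace.go [' '] [] fuel t (c :: acc) := by
  simp [PySem.Chars.replace.go, List.isPrefixOf, Ne.symm hc]

-- str.replace(' ', '') deletes exactly the spaces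
theorem replaceGo_space (fuel : Nat) (l acc : List Char) (h : l.length ≤ fuel) :
    PySem.Chars.replace.go [' '] [] fuel l acc = acc.reverse ++ l.filter (· != ' ') := by
  induction fuel generalizing l acc with
  | zero =>
    cases l with
    | nil => simp [PySem.Chars.replace.go]
    | cons c t => simp at h
  | succ fuel ih =>
    cases l with
    | nil => simp [PySem.Chars.replace.go]
    | cons c t =>
      simp only [List.length_cons] at h
      by_cases hc : c = ' '
      · subst hc
        rw [replaceGo_space_cons, ih t acc (by omega)]
        simp
      · rw [replaceGo_char_cons fuel c t acc hc, ih t (c :: acc) (by omega)]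
        simp [hc]

theorem replace_space (l : List Char) :
    PySem.Chars.replace l [' '] [] = l.filter (· != ' ') := by
  have h : PySem.Chars.replace l [' '] [] = PySem.Chars.replace.go [' '] [] l.length l [] := by
    simp [PySem.Chars.replace]
  rw [h, replaceGo_space l.length l [] le_rfl]
  simp

-- the three shapes of A's loop body
theorem pvStepA_space_eq (k : Int) (acc : List Char) : pvStepA k acc (k, ' ') = acc ++ [' '] := by
  simp [pvStepA]

theorem pvStepA_space_ne (k i : Int) (acc : List Char) (h : i ≠ k) : pvStepA k acc (i, ' ') = acc := by
  simp [pvStepA, h]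

theorem pvStepA_char (k i : Int) (c : Char) (acc : List Char) (h : c ≠ ' ') :
    pvStepA k acc (i, c) = acc ++ [c] := by
  simp [pvStepA, h]

-- A's loop when the kept index lies strictly before every enumerated index
theorem loopA_after (cs : List Char) (s k : Int) (acc : List Char) (h : k < s) :
    (PySem.List.enumerate cs s).foldl (pvStepA k) acc = acc ++ cs.filter (· != ' ') := by
  induction cs generalizing s acc with
  | nil => simp [PySem.List.enumerate]
  | cons c t ih =>
    rw [PySem.List.enumerate_cons, List.foldl_cons]
    by_cases hc : c = ' '
    · subst hc
      rw [pvStepA_space_ne k s acc (by omega), ih (s + 1) acc (by omega)]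
      simp
    · rw [pvStepA_char k s c acc hc, ih (s + 1) (acc ++ [c]) (by omega)]
      simp [hc]

-- A's loop when the kept index is s + j and cs[j] is a space
theorem loopA_keep (cs : List Char) (j : Nat) (s : Int) (acc : List Char)
    (hj : j < cs.length) (hsp : cs[j] = ' ') :
    (PySem.List.enumerate cs s).foldl (pvStepA (s + (j : Int))) acc =
      acc ++ (cs.take j).filter (· != ' ') ++ ' ' :: (cs.drop (j + 1)).filter (· != ' ') := by
  induction j generalizing cs s acc with
  | zero =>
    cases cs with
    | nil => simp at hj
    | cons c t =>
      simp only [List.getElem_cons_zero] at hsp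
      subst hsp
      rw [PySem.List.enumerate_cons, List.foldl_cons]
      have h0 : s + ((0 : Nat) : Int) = s := by push_cast; ring
      rw [h0, pvStepA_space_eq, loopA_after t (s + 1) s (acc ++ [' ']) (by omega)]
      simp
  | succ m ih =>
    cases cs with
    | nil => simp at hj
    | cons c t =>
      have hj' : m < t.length := by simpa using hj
      have hsp' : t[m] = ' ' := by simpa using hsp
      rw [PySem.List.enumerate_cons, List.foldl_cons]
      have harg : s + ((m + 1 : Nat) : Int) = (s + 1) + ((m : Nat) : Int) := by push_cast; ring
      by_cases hc : c = ' '
      · subst hc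
        rw [pvStepA_space_ne _ s acc (by push_cast; omega), harg, ih t (s + 1) acc hj' hsp']
        simp
      · rw [pvStepA_char _ s c acc hc, harg, ih t (s + 1) (acc ++ [c]) hj' hsp']
        simp [hc]

-- every element of A's space_indices list is a Nat-cast index of a space of cs
theorem mem_space_indices (cs : List Char) (x : Int)
    (hx : x ∈ ((PySem.List.enumerate cs 0).filter (fun p => p.2 == ' ')).map (fun p => p.1)) :
    ∃ j : Nat, x = (j : Int) ∧ ∃ h : j < cs.length, cs[j] = ' ' := by
  simp only [List.mem_map, List.mem_filter] at hx
  obtain ⟨p, ⟨hpmem, hpsp⟩, hpx⟩ := hx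
  rw [PySem.List.mem_enumerate_iff] at hpmem
  obtain ⟨k, hk, rfl⟩ := hpmem
  refine ⟨k, by simpa using hpx.symm, hk, by simpa using hpsp⟩

-- a space in cs gives a nonempty space_indices list
theorem space_indices_ne_nil (cs : List Char) (h : ' ' ∈ cs) :
    ((PySem.List.enumerate cs 0).filter (fun p => p.2 == ' ')).map (fun p => p.1) ≠ [] := by
  obtain ⟨j, hj, hsp⟩ := List.mem_iff_getElem.mp h
  intro hnil
  have hmem : ((0 : Int) + (j : Int), cs[j]) ∈ PySem.List.enumerate cs 0 := by
    rw [← PySem.List.getElem_enumerate cs 0 j (by simpa [PySem.List.length_enumerate] using hj)]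
    exact List.getElem_mem _
  have hf : ((0 : Int) + (j : Int), cs[j]) ∈ (PySem.List.enumerate cs 0).filter (fun p => p.2 == ' ') :=
    List.mem_filter.mpr ⟨hmem, by simp [hsp]⟩
  have : ((0 : Int) + (j : Int)) ∈ ((PySem.List.enumerate cs 0).filter (fun p => p.2 == ' ')).map (fun p => p.1) :=
    List.mem_map.mpr ⟨_, hf, rfl⟩
  rw [hnil] at this
  simp at this

-- ===== VERDICT (by name: the statement is the Claim_ definition above) =====
theorem apply_selective_space_removal_py_spec : Claim_equal_apply_selective_space_removal_py := by
  intro value_str _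
  unfold Spec_apply_selective_space_removal_py
  unfold apply_selective_space_removal_py apply_selective_space_removal_py_alt
  set cs := value_str.toList with hcs
  by_cases hin : PySem.Chars.isIn [' '] cs = true
  case neg => rw [if_pos hin, if_pos hin]
  case pos =>
    simp only [hin, not_true, if_false]
    set idxs := ((PySem.List.enumerate cs 0).filter (fun p => p.2 == ' ')).map (fun p => p.1) with hidxs
    have hspace : ' ' ∈ cs :=
      (List.singleton_infix_iff _ _).mp ((PySem.Chars.isIn_iff_infix [' '] cs).mp hin)
    have hne : idxs ≠ [] := space_indices_ne_nil cs hspace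
    have hlen : idxs.length ≠ 0 := by simpa [List.length_eq_zero_iff] using hne
    rw [if_neg hlen]
    by_cases h1 : idxs.length = 1
    · rw [if_pos h1, if_pos h1]
    · rw [if_neg h1, if_neg h1]
      set mid := PySem.Int.floordiv ((idxs.length : Int) - 1) 2 with hmid
      have hmidb : 0 ≤ mid ∧ mid < (idxs.length : Int) := by
        rw [hmid, PySem.Int.floordiv_eq_ediv_of_pos (by omega : (0:Int) < 2)]
        omega
      set keep := PySem.List.pyGetD idxs mid 0 with hkeep
      have hkmem : keep ∈ idxs := by
        rw [hkeep, PySem.List.pyGetD_eq_getElem idxs 0 hmidb.1 hmidb.2]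
        exact List.getElem_mem _
      obtain ⟨j, hkj, hjlt, hjsp⟩ := mem_space_indices cs keep hkmem
      rw [hkj]
      have hA := loopA_keep cs j 0 [] hjlt hjsp
      simp only [zero_add] at hA
      rw [hA]
      rw [PySem.List.slice_to_natCast, replace_space]
      have hstep : ((j : Int) + 1) = ((j + 1 : Nat) : Int) := by push_cast; ring
      rw [hstep, PySem.List.slice_from_natCast, replace_space]
      simp
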